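-- pv_equiv track=rewrite | github.com/kubernetes/website | scripts/content_detection_benchmark/generate_repo.py | _find_content_paragraphs
-- ===== SOURCE A (Python) =====
-- def _find_content_paragraphs(lines, fm):
--     """
--     Return list of (start, end) for content paragraphs (exclusive end).
--     Skips headings, code fences, shortcode lines, HTML comments, and table rows.
--     """
--     paras, in_code, para_start = [], False, None
--     for i in range(fm, len(lines)):
--         line = lines[i]
--         stripped = line.strip()
--         if stripped.startswith("```") or stripped.startswith("~~~"):
--             in_code = not in_code
--             if para_start is not None:
--                 paras.append((para_start, i))
--                 para_start = None
--             continue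
--         if in_code:
--             continue
--         if not stripped:
--             if para_start is not None:
--                 paras.append((para_start, i))
--                 para_start = None
--             continue
--         if (stripped.startswith("#") or stripped.startswith("{{")
--                 or stripped.startswith("{%") or stripped.startswith("<!--")
--                 or stripped.startswith("|") or stripped.startswith(">")):
--             if para_start is not None:
--                 paras.append((para_start, i))
--                 para_start = None
--             continue
--         if para_start is None:
--             para_start = i
--     if para_start is not None:
--         paras.append((para_start, len(lines)))
--     return paras
-- ===== SOURCE B (Python) =====
-- _BREAKERS = ("#", "{{", "{%", "<!--", "|", ">")
--
-- def _find_content_paragraphs(lines, fm):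
--     """
--     Two-pass rewrite: first classify every scanned line as content / non-content
--     (tracking only the code-fence toggle), then group maximal runs of content
--     lines into (start, last+1) ranges.
--     """
--     # pass 1: classification
--     flags = []
--     in_code = False
--     for i in range(fm, len(lines)):
--         s = lines[i].strip()
--         if s.startswith(("```", "~~~")):
--             in_code = not in_code
--             flags.append((i, False))
--         else:
--             flags.append((i, not in_code and bool(s) and not s.startswith(_BREAKERS)))
--     # pass 2: group maximal runs of True
--     paras = []
--     k = 0
--     while k < len(flags):
--         i, f = flags[k]
--         k += 1
--         if f:
--             e = i
--             while k < len(flags) and flags[k][1]: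
--                 e = flags[k][0]
--                 k += 1
--             paras.append((i, e + 1))
--     return paras
-- ===== Notes on version B (the rewrite author's own statement) =====
-- stated objective: alternative
-- what changed: A interleaves paragraph bookkeeping (open/close para_start, in_code) in one stateful loop; B separates concerns into two passes: a classification pass producing per-line content flags (tracking only the fence toggle) and a grouping pass turning maximal runs of True flags into (start, last+1) ranges.
import Mathlib
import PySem

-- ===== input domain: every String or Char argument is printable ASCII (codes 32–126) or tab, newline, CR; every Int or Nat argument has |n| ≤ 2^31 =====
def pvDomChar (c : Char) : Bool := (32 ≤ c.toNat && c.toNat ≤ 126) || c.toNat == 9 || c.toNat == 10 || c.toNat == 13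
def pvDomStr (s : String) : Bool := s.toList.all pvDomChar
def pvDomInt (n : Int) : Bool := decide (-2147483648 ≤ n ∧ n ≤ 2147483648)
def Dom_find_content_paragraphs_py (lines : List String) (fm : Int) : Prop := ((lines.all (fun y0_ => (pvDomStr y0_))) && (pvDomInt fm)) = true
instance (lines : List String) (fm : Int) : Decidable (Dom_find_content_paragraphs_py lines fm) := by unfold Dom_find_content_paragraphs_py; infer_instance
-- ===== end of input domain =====

-- B replaces A's single stateful loop by a classify-then-group-runs decomposition (alternative, same cost).


-- shared per-line predicates (the literal string tests both Pythons perform)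
def pvStripLine (lines : List String) (i : Int) : String :=
  PySem.Str.strip ((PySem.List.pyGet? lines i).getD "")

def pvIsFence (s : String) : Bool :=
  PySem.Str.startswith s "```" || PySem.Str.startswith s "~~~"

def pvIsBreaker (s : String) : Bool :=
  PySem.Str.startswith s "#" || PySem.Str.startswith s "{{" || PySem.Str.startswith s "{%" ||
  PySem.Str.startswith s "<!--" || PySem.Str.startswith s "|" || PySem.Str.startswith s ">"

-- ===== PORT A =====
-- 'if para_start is not None: paras.append((para_start, i)); para_start = None'
def pvCloseA (paras : List (Int × Int)) (para_start : Option Int) (i : Int) : List (Int × Int) :=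
  match para_start with
  | some p => paras ++ [(p, i)]
  | none => paras

-- A's for-loop over range(fm, len(lines)), state (paras, in_code, para_start)
def pvLoopA (lines : List String) : List Int → List (Int × Int) → Bool → Option Int →
    List (Int × Int) × Option Int
  | [], paras, _, para_start => (paras, para_start)
  | i :: rest, paras, in_code, para_start =>
    let s := pvStripLine lines i
    if pvIsFence s then
      pvLoopA lines rest (pvCloseA paras para_start i) (!in_code) none
    else if in_code then
      pvLoopA lines rest paras in_code para_start
    else if s == "" then
      pvLoopA lines rest (pvCloseA paras para_start i) in_code none
    else if pvIsBreaker s then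
      pvLoopA lines rest (pvCloseA paras para_start i) in_code none
    else
      pvLoopA lines rest paras in_code
        (match para_start with | none => some i | some p => some p)

-- trailing 'if para_start is not None: paras.append((para_start, len(lines)))'
def pvFinA (lines : List String) (st : List (Int × Int) × Option Int) : List (Int × Int) :=
  match st.2 with
  | some p => st.1 ++ [(p, (lines.length : Int))]
  | none => st.1

def find_content_paragraphs_py (lines : List String) (fm : Int) : List (Int × Int) :=
  pvFinA lines (pvLoopA lines (PySem.List.pyRange fm (lines.length : Int) 1) [] false none)

-- ===== PORT B =====
-- pass 1: per-line content flags; only the fence toggle is threaded through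
def pvPass1 (lines : List String) : List Int → Bool → List (Int × Bool)
  | [], _ => []
  | i :: rest, in_code =>
    let s := pvStripLine lines i
    if pvIsFence s then
      (i, false) :: pvPass1 lines rest (!in_code)
    else
      (i, !in_code && !(s == "") && !pvIsBreaker s) :: pvPass1 lines rest in_code

-- inner while: extend the current run, returning its last index and the rest
def pvChase (e : Int) : List (Int × Bool) → Int × List (Int × Bool)
  | (j, true) :: rest => pvChase j rest
  | rest => (e, rest)

theorem pvChase_length_le (e : Int) (l : List (Int × Bool)) : (pvChase e l).2.length ≤ l.length := by
  induction l generalizing e with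
  | nil => simp [pvChase]
  | cons hd t ih =>
    rcases hd with ⟨j, f⟩
    cases f
    · simp [pvChase]
    · simpa [pvChase] using le_trans (ih j) (Nat.le_succ _)

-- pass 2: group maximal runs of True into (start, last+1)
def pvRuns : List (Int × Bool) → List (Int × Int)
  | [] => []
  | (_, false) :: rest => pvRuns rest
  | (i, true) :: rest =>
    (i, (pvChase i rest).1 + 1) :: pvRuns (pvChase i rest).2
termination_by l => l.length
decreasing_by
  all_goals simp only [List.length_cons]
  all_goals first
    | omega
    | exact Nat.lt_succ_of_le (pvChase_length_le _ _)

def find_content_paragraphs_py_alt (lines : List String) (fm : Int) : List (Int × Int) :=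
  pvRuns (pvPass1 lines (PySem.List.pyRange fm (lines.length : Int) 1) false)

-- ===== PRECONDITION & SPEC =====
-- Pre_ excludes exactly the inputs where A raises IndexError (fm below -len(lines)); B raises there too.
def Pre_find_content_paragraphs_py (lines : List String) (fm : Int) : Prop :=
  -(lines.length : Int) ≤ fm
instance (lines : List String) (fm : Int) : Decidable (Pre_find_content_paragraphs_py lines fm) := by
  unfold Pre_find_content_paragraphs_py; infer_instance

def pvWitness_find_content_paragraphs_py : List String × Int := (["hello", "", "world"], 0)

def Spec_find_content_paragraphs_py (lines : List String) (fm : Int) (out : List (Int × Int)) : Prop := out = find_content_paragraphs_py_alt lines fm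
instance (lines : List String) (fm : Int) (out : List (Int × Int)) : Decidable (Spec_find_content_paragraphs_py lines fm out) := by unfold Spec_find_content_paragraphs_py; infer_instance

-- ===== CLAIM (what is proved, stated in full; the proofs are below) =====
def Claim_equal_find_content_paragraphs_py : Prop := ∀ (lines : List String) (fm : Int), Dom_find_content_paragraphs_py lines fm → Pre_find_content_paragraphs_py lines fm → Spec_find_content_paragraphs_py lines fm (find_content_paragraphs_py lines fm)

-- ===== LEMMAS AND PROOFS =====

theorem pvRuns_nil : pvRuns [] = [] := by simp [pvRuns]
theorem pvRuns_false (i : Int) (t : List (Int × Bool)) : pvRuns ((i, false) :: t) = pvRuns t := by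
  simp [pvRuns]
theorem pvRuns_true (i : Int) (t : List (Int × Bool)) :
    pvRuns ((i, true) :: t) = (i, (pvChase i t).1 + 1) :: pvRuns (pvChase i t).2 := by
  simp [pvRuns]

-- Main invariant, by induction on the length of the remaining range [a, len).
-- First conjunct: no open paragraph; second conjunct: paragraph open at p,
-- previous scanned index prev (so a = prev + 1 and a ≤ len).
theorem pv_main (lines : List String) : ∀ (m : Nat) (a : Int),
    (((lines.length : Int) - a).toNat = m) →
    ((∀ (acc : List (Int × Int)) (ic : Bool),
        pvFinA lines (pvLoopA lines (PySem.List.pyRange a (lines.length : Int) 1) acc ic none) =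
          acc ++ pvRuns (pvPass1 lines (PySem.List.pyRange a (lines.length : Int) 1) ic)) ∧
     (a ≤ (lines.length : Int) → ∀ (acc : List (Int × Int)) (p prev : Int), prev + 1 = a →
        pvFinA lines (pvLoopA lines (PySem.List.pyRange a (lines.length : Int) 1) acc false (some p)) =
          acc ++ (p, (pvChase prev (pvPass1 lines (PySem.List.pyRange a (lines.length : Int) 1) false)).1 + 1) ::
            pvRuns (pvChase prev (pvPass1 lines (PySem.List.pyRange a (lines.length : Int) 1) false)).2)) := by
  intro m
  induction m with
  | zero =>
    intro a ha
    have hnil : PySem.List.pyRange a (lines.length : Int) 1 = [] :=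
      PySem.List.pyRange_one_eq_nil (by omega)
    constructor
    · intro acc ic
      simp [hnil, pvLoopA, pvPass1, pvRuns_nil, pvFinA]
    · intro hle acc p prev hprev
      have haeq : a = (lines.length : Int) := by omega
      simp [pvLoopA, pvPass1, pvChase, pvFinA, pvRuns_nil, ← haeq, ← hprev]
  | succ m ih =>
    intro a ha
    have hlt : a < (lines.length : Int) := by omega
    have hcons := PySem.List.pyRange_one_cons hlt
    have ihm := ih (a + 1) (by omega)
    constructor
    · intro acc ic
      rw [hcons]
      by_cases hf : pvIsFence (pvStripLine lines a) = true
      · simp only [pvLoopA, pvPass1, hf, if_true, pvCloseA]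
        rw [ihm.1 acc (!ic), pvRuns_false]
      · by_cases hic : ic = true
        · simp only [pvLoopA, pvPass1, hf, hic, if_true, if_false, Bool.not_true,
            Bool.false_and, Bool.false_eq_true]
          rw [ihm.1 acc true, pvRuns_false]
        · simp only [Bool.not_eq_true] at hic
          subst hic
          by_cases hb : (pvStripLine lines a == "") = true
          · simp only [pvLoopA, pvPass1, hf, hb, if_true, if_false, pvCloseA,
              Bool.not_false, Bool.not_true, Bool.false_and,
              Bool.and_false, Bool.false_eq_true]
            rw [ihm.1 acc false, pvRuns_false]
          · by_cases hk : pvIsBreaker (pvStripLine lines a) = true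
            · simp only [pvLoopA, pvPass1, hf, hb, hk, if_true, if_false,
                pvCloseA, Bool.not_false, Bool.true_and, Bool.not_true, Bool.and_false,
                Bool.false_eq_true]
              rw [ihm.1 acc false, pvRuns_false]
            · simp only [pvLoopA, pvPass1, hf, hb, hk, if_false,
                Bool.not_false, Bool.and_true, Bool.false_eq_true]
              rw [ihm.2 (by omega) acc a a rfl, pvRuns_true]
    · intro hle acc p prev hprev
      rw [hcons]
      by_cases hf : pvIsFence (pvStripLine lines a) = true
      · simp only [pvLoopA, pvPass1, hf, if_true, pvCloseA, Bool.not_false]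
        rw [ihm.1 (acc ++ [(p, a)]) true]
        simp [pvChase, pvRuns_false, ← hprev]
      · by_cases hb : (pvStripLine lines a == "") = true
        · simp only [pvLoopA, pvPass1, hf, hb, if_true, if_false, pvCloseA,
            Bool.not_false, Bool.not_true, Bool.false_and,
            Bool.and_false, Bool.false_eq_true]
          rw [ihm.1 (acc ++ [(p, a)]) false]
          simp [pvChase, pvRuns_false, ← hprev]
        · by_cases hk : pvIsBreaker (pvStripLine lines a) = true
          · simp only [pvLoopA, pvPass1, hf, hb, hk, if_true, if_false, pvCloseA,
              Bool.not_false, Bool.not_true, Bool.and_false,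
              Bool.false_eq_true]
            rw [ihm.1 (acc ++ [(p, a)]) false]
            simp [pvChase, pvRuns_false, ← hprev]
          · simp only [pvLoopA, pvPass1, hf, hb, hk, if_false,
              Bool.not_false, Bool.and_true, Bool.false_eq_true]
            rw [ihm.2 (by omega) acc p a rfl]
            simp [pvChase]

-- ===== VERDICT (by name: the statement is the Claim_ definition above) =====
theorem find_content_paragraphs_py_spec : Claim_equal_find_content_paragraphs_py := by
  intro lines fm _ _
  unfold Spec_find_content_paragraphs_py find_content_paragraphs_py find_content_paragraphs_py_alt
  simpa using (pv_main lines (((lines.length : Int) - fm).toNat) fm rfl).1 [] false
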